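-- pv_equiv track=rewrite | github.com/mindspore-ai/akg | python/akg/ops/nn/cpu/layout_transform_utils.py | get_tiled_pair
-- ===== SOURCE A (Python) =====
-- def get_alpha_only(s):
--     """Get the aplha from string.
--     For example get_alpha_only("8c") = "c"
--     """
--     for ch in s:
--         if ch.isalpha():
--             return ch
--
-- def get_tiled_pair(layout, exclude=None):
--     """Get the idx for tiled pair.
--     For example, layout can be list("N", "C", "H", "W", "8c")
--     """
--     if exclude == None:
--       exclude = list()
--     layout_len = len(layout)
--     for i in range(layout_len):
--         for j in range(i + 1, layout_len):
--             if layout[i].lower() == get_alpha_only(layout[j]) and layout[i] not in exclude: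
--                 return i, j
--     return -1, -1
-- ===== SOURCE B (Python) =====
-- def get_alpha_only(s):
--     """First alphabetic character of s, or None."""
--     return next((ch for ch in s if ch.isalpha()), None)
--
-- def get_tiled_pair(layout, exclude=None):
--     """Index the positions by their alpha character once, then for each i
--     look up only the candidate j's instead of rescanning the whole tail."""
--     ex = set() if exclude is None else set(exclude)
--     positions = {}
--     for j, s in enumerate(layout):
--         a = get_alpha_only(s)
--         if a is not None:
--             positions.setdefault(a, []).append(j)
--     for i, s in enumerate(layout):
--         if s in ex:
--             continue
--         for j in positions.get(s.lower(), ()):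
--             if j > i:
--                 return i, j
--     return -1, -1
-- ===== Notes on version B (the rewrite author's own statement) =====
-- stated objective: alternative
-- what changed: B builds a dict from alpha character to its ascending positions in one pass, then each i does a single lookup for its candidate j's instead of rescanning the whole tail (and recomputing get_alpha_only) for every i; the prepass makes it slower than A's early exit on inputs whose first pair appears immediately, so no speed is claimed.
import Mathlib
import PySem

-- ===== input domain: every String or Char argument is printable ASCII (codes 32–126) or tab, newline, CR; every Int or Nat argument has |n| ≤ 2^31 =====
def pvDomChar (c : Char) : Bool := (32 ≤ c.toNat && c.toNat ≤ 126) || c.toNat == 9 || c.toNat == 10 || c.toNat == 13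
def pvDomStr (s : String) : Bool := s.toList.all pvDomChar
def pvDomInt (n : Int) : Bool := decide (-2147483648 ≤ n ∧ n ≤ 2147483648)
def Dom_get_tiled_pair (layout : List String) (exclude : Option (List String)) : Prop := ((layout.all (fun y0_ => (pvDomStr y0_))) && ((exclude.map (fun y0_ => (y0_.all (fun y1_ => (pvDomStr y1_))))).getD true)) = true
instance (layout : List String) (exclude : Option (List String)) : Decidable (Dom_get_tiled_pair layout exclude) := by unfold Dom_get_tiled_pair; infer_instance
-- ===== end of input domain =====

-- B replaces A's rescans of the tail by a one-pass index from alpha character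
-- to its ascending positions, looked up once per i (objective: alternative).

-- ===== PORT A =====
-- get_alpha_only(s): first alphabetic character, or None (shared by both ports)
def get_alpha_only : List Char → Option Char
  | [] => none
  | c :: rest => if PySem.Chars.isalpha c then some c else get_alpha_only rest

-- `key == get_alpha_only(lj)` where key is an already-computed string
-- (a str/None comparison in Python: False when get_alpha_only returns None)
def pvKeyMatch (key : List Char) (lj : String) : Bool :=
  match get_alpha_only lj.toList with
  | some c => key == [c]
  | none => false

-- inner loop: for j in range(i+1, n): if layout[i].lower() == get_alpha_only(layout[j]) and layout[i] not in exclude: return i, j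
def pvAInner (layout : List String) (ex : List String) (li : String) : List Int → Option Int
  | [] => none
  | j :: js =>
      if pvKeyMatch (PySem.Chars.lower li.toList) (PySem.List.pyGetD layout j "") && !(ex.contains li) then
        some j
      else pvAInner layout ex li js

-- outer loop: for i in range(layout_len)
def pvAOuter (layout : List String) (ex : List String) (n : Int) : List Int → List Int
  | [] => [-1, -1]
  | i :: is =>
      match pvAInner layout ex (PySem.List.pyGetD layout i "") (PySem.List.pyRange (i + 1) n) with
      | some j => [i, j]
      | none => pvAOuter layout ex n is

def get_tiled_pair (layout : List String) (exclude : Option (List String)) : List Int :=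
  let ex := exclude.getD []
  let n := PySem.List.len layout
  pvAOuter layout ex n (PySem.List.pyRange 0 n)

-- ===== PORT B =====
-- positions: dict alpha-char (as a 1-char string) -> ascending list of indices
def pvBuildIndex (ps : List (Int × String)) : PySem.Dict (List Char) (List Int) :=
  ps.foldl (fun d p =>
    match get_alpha_only p.2.toList with
    | none => d
    | some c => d.modify [c] [] (· ++ [p.1])) PySem.Dict.empty

-- for i, s in enumerate(layout): skip excluded, else first candidate j > i wins
def pvScan (ex : PySem.Set String) (idx : PySem.Dict (List Char) (List Int)) :
    List (Int × String) → List Int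
  | [] => [-1, -1]
  | (i, s) :: rest =>
      if ex.contains s then pvScan ex idx rest
      else
        match (idx.getD (PySem.Chars.lower s.toList) []).find? (fun j => decide (i < j)) with
        | some j => [i, j]
        | none => pvScan ex idx rest

def get_tiled_pair_alt (layout : List String) (exclude : Option (List String)) : List Int :=
  let ex := PySem.Set.ofList (exclude.getD [])
  let idx := pvBuildIndex (PySem.List.enumerate layout)
  pvScan ex idx (PySem.List.enumerate layout)

-- ===== PRECONDITION & SPEC =====
def Spec_get_tiled_pair (layout : List String) (exclude : Option (List String)) (out : List Int) : Prop := out = get_tiled_pair_alt layout exclude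
instance (layout : List String) (exclude : Option (List String)) (out : List Int) : Decidable (Spec_get_tiled_pair layout exclude out) := by unfold Spec_get_tiled_pair; infer_instance

-- ===== CLAIM (what is proved, stated in full; the proofs are below) =====
def Claim_equal_get_tiled_pair : Prop := ∀ (layout : List String) (exclude : Option (List String)), Dom_get_tiled_pair layout exclude → Spec_get_tiled_pair layout exclude (get_tiled_pair layout exclude)

-- ===== LEMMAS AND PROOFS =====

-- A's inner loop is a first-match search
lemma pvAInner_eq_find? (layout : List String) (ex : List String) (li : String) (js : List Int) :
    pvAInner layout ex li js =
      js.find? (fun j => pvKeyMatch (PySem.Chars.lower li.toList) (PySem.List.pyGetD layout j "") && !(ex.contains li)) := by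
  induction js with
  | nil => rfl
  | cons j js ih =>
      cases h : pvKeyMatch (PySem.Chars.lower li.toList) (PySem.List.pyGetD layout j "") && !(ex.contains li) <;>
        simp only [pvAInner, List.find?, h, ih] <;> simp

-- keeping only the indices above i of range(0, n) gives range(i+1, n)
lemma pvFilterRangeLt (n : Nat) (i : Int) (h : 0 ≤ i) :
    (PySem.List.pyRange 0 (n : Int)).filter (fun j => decide (i < j)) = PySem.List.pyRange (i + 1) (n : Int) := by
  induction n with
  | zero =>
      rw [PySem.List.pyRange_one_eq_nil (by omega), PySem.List.pyRange_one_eq_nil (by omega)]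
      rfl
  | succ n ih =>
      have hcast : ((n + 1 : Nat) : Int) = (n : Int) + 1 := by push_cast; ring
      rw [hcast, PySem.List.pyRange_one_succ_right (by positivity), List.filter_append, ih]
      by_cases hin : i < (n : Int)
      · rw [PySem.List.pyRange_one_succ_right (by omega)]
        simp [hin]
      · rw [PySem.List.pyRange_one_eq_nil (by omega), PySem.List.pyRange_one_eq_nil (by omega)]
        simp [hin]

-- the index dict: candidates for a key are exactly the matching positions, in order
lemma pvBuildIndex_getD (ps : List (Int × String)) (key : List Char) :
    (pvBuildIndex ps).getD key [] =
      ((ps.filterMap (fun p => match get_alpha_only p.2.toList with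
          | some c => some (([c] : List Char), p.1)
          | none => none)).filter (fun q => q.1 == key)).map (·.2) := by
  have hfold : pvBuildIndex ps =
      List.foldl (fun d q => d.modify q.1 [] (· ++ [q.2])) PySem.Dict.empty
        (ps.filterMap (fun p => match get_alpha_only p.2.toList with
          | some c => some (([c] : List Char), p.1)
          | none => none)) := by
    rw [List.foldl_filterMap]
    unfold pvBuildIndex
    congr 1
    funext d p
    cases h : get_alpha_only p.2.toList with
    | none => rfl
    | some c => rfl
  rw [hfold, PySem.Dict.getD_foldl_modify_append]
  simp only [PySem.Dict.getD_empty, List.nil_append]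

-- folding the filterMap/filter/map chain into a plain filter on the indices
lemma pvCandFilter (layout : List String) (l : List Int) (key : List Char) :
    ((l.filterMap (fun j => match get_alpha_only (PySem.List.pyGetD layout j "").toList with
        | some c => some (([c] : List Char), j)
        | none => none)).filter (fun q => q.1 == key)).map (·.2) =
      l.filter (fun j => pvKeyMatch key (PySem.List.pyGetD layout j "")) := by
  induction l with
  | nil => rfl
  | cons j l ih =>
      simp only [List.filterMap_cons]
      cases h : get_alpha_only (PySem.List.pyGetD layout j "").toList with
      | none => simpa [pvKeyMatch, h] using ih
      | some c =>
          by_cases hk : ([c] : List Char) = key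
          · subst hk; simp [pvKeyMatch, h, ih]
          · have h1 : (([c] : List Char) == key) = false := beq_eq_false_iff_ne.mpr hk
            have h2 : pvKeyMatch key (PySem.List.pyGetD layout j "") = false := by
              rw [pvKeyMatch, h]
              exact beq_eq_false_iff_ne.mpr (fun e => hk e.symm)
            simp [h1, h2, ih]

-- the candidate list for key, over the whole layout
lemma pvCand (layout : List String) (key : List Char) :
    (pvBuildIndex (PySem.List.enumerate layout)).getD key [] =
      (PySem.List.pyRange 0 (PySem.List.len layout)).filter
        (fun j => pvKeyMatch key (PySem.List.pyGetD layout j "")) := by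
  rw [pvBuildIndex_getD, PySem.List.enumerate_eq_map_pyRange layout "", List.filterMap_map]
  exact pvCandFilter layout _ key

lemma pvSetContains (ex : List String) (s : String) :
    (PySem.Set.ofList ex).contains s = ex.contains s := by
  have := PySem.Set.mem_ofList ex s
  by_cases h : s ∈ ex <;> simp_all

-- one step: A's inner scan over the tail = B's lookup + first candidate above i
lemma pvStep (layout : List String) (ex : List String) (i : Int) (h : 0 ≤ i) :
    pvAInner layout ex (PySem.List.pyGetD layout i "") (PySem.List.pyRange (i + 1) (PySem.List.len layout)) =
      (if (PySem.Set.ofList ex).contains (PySem.List.pyGetD layout i "") then none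
       else ((pvBuildIndex (PySem.List.enumerate layout)).getD
              (PySem.Chars.lower (PySem.List.pyGetD layout i "").toList) []).find? (fun j => decide (i < j))) := by
  set li := PySem.List.pyGetD layout i "" with hli
  rw [pvAInner_eq_find?, pvSetContains]
  cases hex : ex.contains li with
  | true =>
      rw [if_pos (of_decide_eq_true (by decide))]
      rw [List.find?_eq_none]
      intro j _
      simp
  | false =>
      rw [if_neg (by decide)]
      rw [pvCand, ← List.head?_filter, ← List.head?_filter, List.filter_filter]
      have hn : PySem.List.len layout = ((layout.length : Nat) : Int) := by rfl
      rw [hn, ← pvFilterRangeLt layout.length i h, List.filter_filter]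
      congr 1
      apply List.filter_congr
      intro j _
      cases h1 : pvKeyMatch (PySem.Chars.lower li.toList) (PySem.List.pyGetD layout j "") <;> simp

-- the outer loops walk the same indices
lemma pvOuter (layout : List String) (ex : List String) (l : List Int) (h : ∀ i ∈ l, 0 ≤ i) :
    pvAOuter layout ex (PySem.List.len layout) l =
      pvScan (PySem.Set.ofList ex) (pvBuildIndex (PySem.List.enumerate layout))
        (l.map (fun j => (j, PySem.List.pyGetD layout j ""))) := by
  induction l with
  | nil => rfl
  | cons i l ih =>
      have hi : 0 ≤ i := h i (by simp)
      have ih' := ih (fun x hx => h x (by simp [hx]))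
      simp only [pvAOuter, List.map_cons, pvScan]
      rw [pvStep layout ex i hi]
      cases hex : (PySem.Set.ofList ex).contains (PySem.List.pyGetD layout i "") with
      | true =>
          rw [if_pos (of_decide_eq_true (by decide)), if_pos (of_decide_eq_true (by decide))]
          exact ih'
      | false =>
          rw [if_neg (by decide), if_neg (by decide)]
          cases hf : ((pvBuildIndex (PySem.List.enumerate layout)).getD
              (PySem.Chars.lower (PySem.List.pyGetD layout i "").toList) []).find? (fun j => decide (i < j)) with
          | none => exact ih'
          | some j => rfl

-- ===== VERDICT (by name: the statement is the Claim_ definition above) =====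
theorem get_tiled_pair_spec : Claim_equal_get_tiled_pair := by
  intro layout exclude _
  unfold Spec_get_tiled_pair get_tiled_pair get_tiled_pair_alt
  show pvAOuter layout (exclude.getD []) (PySem.List.len layout) (PySem.List.pyRange 0 (PySem.List.len layout)) =
    pvScan (PySem.Set.ofList (exclude.getD [])) (pvBuildIndex (PySem.List.enumerate layout))
      (PySem.List.enumerate layout)
  nth_rewrite 2 [PySem.List.enumerate_eq_map_pyRange layout ""]
  exact pvOuter layout (exclude.getD []) _ (fun i hi => (PySem.List.mem_pyRange_one.mp hi).1)
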